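-- pv_equiv track=rewrite | github.com/ChloeL19/CS124_P3 | utils.py | pp_conversion
-- ===== SOURCE A (Python) =====
-- def pp_conversion(A, G):
--     '''
--     Convert a solution in prepartitioned form to standard form.
--         - A: list of integers that have been assigned groups
--         - G: int list, list of group IDs for each of the integers
--     '''
--     # res = []
--     # for i in range(len(A)):
--     #     res.append(0)
--     # for i in range(len(A)):
--     #     res[G[i]-1] += A[i]
--
--     # # way too slow, but only version that is correct:
--     seen_gids = []
--     res = []
--     for i in range(len(A)):
--         if G[i] in seen_gids:
--             Aind = G.index(G[i]) # find first instance of this gid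
--             res[Aind] += A[i]
--             res.append(0)
--         else:
--             res.append(A[i])
--             seen_gids.append(G[i])
--     return res
-- ===== SOURCE B (Python) =====
-- def pp_conversion(A, G):
--     '''
--     Convert a solution in prepartitioned form to standard form.
--         - A: list of integers that have been assigned groups
--         - G: int list, list of group IDs for each of the integers
--     '''
--     # Pass 1: total of A-values per group id.
--     sums = {}
--     for a, g in zip(A, G):
--         sums[g] = sums.get(g, 0) + a
--     # Pass 2: lay each group's full total at its first-occurrence slot, 0 elsewhere.
--     res = []
--     seen = set()
--     for g in G[:len(A)]:
--         if g in seen: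
--             res.append(0)
--         else:
--             res.append(sums[g])
--             seen.add(g)
--     return res
-- ===== Notes on version B (the rewrite author's own statement) =====
-- stated objective: faster
-- what changed: Replaces A's single pass that repeatedly rescans seen_gids with `in` and G with list.index (quadratic) by two linear passes: a dict of complete per-group totals built first, then the totals laid out at first-occurrence positions using a seen set.
import Mathlib
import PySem

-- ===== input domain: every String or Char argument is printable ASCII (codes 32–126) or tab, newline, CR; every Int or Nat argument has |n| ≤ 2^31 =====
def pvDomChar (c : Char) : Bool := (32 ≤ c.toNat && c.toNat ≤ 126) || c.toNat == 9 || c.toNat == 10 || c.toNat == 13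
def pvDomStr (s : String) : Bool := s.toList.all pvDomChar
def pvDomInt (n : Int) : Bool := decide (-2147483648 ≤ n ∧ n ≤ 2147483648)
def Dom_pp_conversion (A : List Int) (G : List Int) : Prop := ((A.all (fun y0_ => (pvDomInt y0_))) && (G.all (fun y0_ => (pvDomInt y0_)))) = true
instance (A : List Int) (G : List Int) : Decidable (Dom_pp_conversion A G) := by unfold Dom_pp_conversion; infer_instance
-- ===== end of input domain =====

-- B replaces A's quadratic single pass (membership scan of seen_gids plus G.index rescans)
-- by two linear passes: a dict of complete per-group totals, then totals laid out at
-- first-occurrence positions with a seen set (objective: faster).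

-- ===== PORT A =====
def ppStepA (A : List Int) (G : List Int) (st : List Int × List Int) (i : Nat) :
    List Int × List Int :=
  let gi := G.getD i 0
  if gi ∈ st.1 then
    let aind := (PySem.List.index? G gi).getD 0   -- G.index(G[i]): always found here, gi ∈ seen ⊆ G
    (st.1, (st.2.set aind (st.2.getD aind 0 + A.getD i 0)) ++ [0])
  else
    (st.1 ++ [gi], st.2 ++ [A.getD i 0])

def pp_conversion (A : List Int) (G : List Int) : List Int :=
  ((List.range A.length).foldl (ppStepA A G) ([], [])).2

-- ===== PORT B =====
def ppSums (A : List Int) (G : List Int) : PySem.Dict Int Int :=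
  (A.zip G).foldl (fun d p => d.insert p.2 (d.getD p.2 0 + p.1)) PySem.Dict.empty

def ppStepB (sums : PySem.Dict Int Int) (st : PySem.Set Int × List Int) (g : Int) :
    PySem.Set Int × List Int :=
  if PySem.Set.contains st.1 g then (st.1, st.2 ++ [0])
  else (PySem.Set.add st.1 g, st.2 ++ [sums.getD g 0])

def pp_conversion_alt (A : List Int) (G : List Int) : List Int :=
  ((G.take A.length).foldl (ppStepB (ppSums A G)) (PySem.Set.empty, [])).2

-- ===== PRECONDITION & SPEC =====
-- A raises IndexError on G[i] when len(G) < len(A); it returns normally otherwise.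
def Pre_pp_conversion (A : List Int) (G : List Int) : Prop := A.length ≤ G.length
instance (A : List Int) (G : List Int) : Decidable (Pre_pp_conversion A G) := by
  unfold Pre_pp_conversion; infer_instance

def pvWitness_pp_conversion : List Int × List Int := ([3, 1, 4, 1], [7, 2, 7, 2])

def Spec_pp_conversion (A : List Int) (G : List Int) (out : List Int) : Prop := out = pp_conversion_alt A G
instance (A : List Int) (G : List Int) (out : List Int) : Decidable (Spec_pp_conversion A G out) := by unfold Spec_pp_conversion; infer_instance

-- ===== CLAIM (what is proved, stated in full; the proofs are below) =====
def Claim_equal_pp_conversion : Prop := ∀ (A : List Int) (G : List Int), Dom_pp_conversion A G → Pre_pp_conversion A G → Spec_pp_conversion A G (pp_conversion A G)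

-- ===== LEMMAS AND PROOFS =====

-- total of A-values of the group g among the first n indices
def ppTot (A : List Int) (G : List Int) (n : Nat) (g : Int) : Int :=
  (((List.range n).filter (fun k => G.getD k 0 == g)).map (fun k => A.getD k 0)).sum

-- the value ending at position j once the first n indices are processed
def ppEntry (A : List Int) (G : List Int) (n j : Nat) : Int :=
  if ∀ k < j, G.getD k 0 ≠ G.getD j 0 then ppTot A G n (G.getD j 0) else 0

-- the seen set after processing the first i indices (shared shape of both loops)
def ppSeen (G : List Int) : Nat → PySem.Set Int
  | 0 => PySem.Set.empty
  | i + 1 => PySem.Set.add (ppSeen G i) (G.getD i 0)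

lemma mem_ppSeen (G : List Int) (g : Int) :
    ∀ i, g ∈ ppSeen G i ↔ ∃ k, k < i ∧ G.getD k 0 = g := by
  intro i
  induction i with
  | zero => simp [ppSeen, PySem.Set.empty]
  | succ i ih =>
    rw [ppSeen, PySem.Set.mem_add, ih]
    constructor
    · rintro (⟨k, hk, hkg⟩ | h)
      · exact ⟨k, Nat.lt_succ_of_lt hk, hkg⟩
      · exact ⟨i, Nat.lt_succ_self i, h.symm⟩
    · rintro ⟨k, hk, hkg⟩
      rcases Nat.lt_succ_iff_lt_or_eq.mp hk with hk' | rfl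
      · exact Or.inl ⟨k, hk', hkg⟩
      · exact Or.inr hkg.symm

lemma ppTot_succ (A G : List Int) (i : Nat) (g : Int) :
    ppTot A G (i + 1) g =
      ppTot A G i g + (if G.getD i 0 = g then A.getD i 0 else 0) := by
  unfold ppTot
  rw [List.range_succ, List.filter_append, List.map_append, List.sum_append]
  congr 1
  simp only [List.filter_cons, List.filter_nil]
  by_cases h : G.getD i 0 = g
  · rw [if_pos (by simp only [beq_iff_eq]; exact h), if_pos h]; simp
  · rw [if_neg (by simp only [beq_iff_eq]; exact h), if_neg h]; simp

lemma ppTot_zero_of (A G : List Int) (i : Nat) (g : Int)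
    (h : ∀ k < i, G.getD k 0 ≠ g) : ppTot A G i g = 0 := by
  unfold ppTot
  have : (List.range i).filter (fun k => G.getD k 0 == g) = [] := by
    rw [List.filter_eq_nil_iff]
    intro k hk
    simp only [List.mem_range] at hk
    simp only [beq_iff_eq]
    exact h k hk
  rw [this]; simp

lemma set_map_range (f : Nat → Int) (i j0 : Nat) (h : j0 < i) (v : Int) :
    ((List.range i).map f).set j0 v =
      (List.range i).map (fun j => if j = j0 then v else f j) := by
  apply List.ext_getElem
  · simp
  · intro k h1 h2
    simp only [List.getElem_set, List.getElem_map, List.getElem_range]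
    by_cases hk : k = j0
    · simp [hk]
    · rw [if_neg (fun h' => hk h'.symm), if_neg hk]

lemma getD_map_range' (f : Nat → Int) (i j0 : Nat) (h : j0 < i) :
    ((List.range i).map f).getD j0 0 = f j0 := by
  rw [List.getD_eq_getElem?_getD]
  simp [h]

-- the invariant of A's loop
lemma loopA (A G : List Int) (h : A.length ≤ G.length) :
    ∀ i, i ≤ A.length →
      (List.range i).foldl (ppStepA A G) ([], []) =
        (ppSeen G i, (List.range i).map (ppEntry A G i)) := by
  intro i
  induction i with
  | zero => intro _; simp [ppSeen, PySem.Set.empty]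
  | succ i ih =>
    intro hi
    have hi' : i ≤ A.length := Nat.le_of_succ_le hi
    have hiG : i < G.length := Nat.lt_of_lt_of_le (Nat.lt_of_lt_of_le (Nat.lt_succ_of_le (le_refl i)) hi) h
    rw [List.range_succ, List.foldl_append, ih hi']
    simp only [List.foldl_cons, List.foldl_nil]
    set gi := G.getD i 0 with hgi
    by_cases hmem : gi ∈ ppSeen G i
    · -- seen before: accumulate into first-occurrence slot, append 0
      obtain ⟨k, hk, hGk⟩ := (mem_ppSeen G gi i).mp hmem
      have hkG : k < G.length := Nat.lt_of_lt_of_le (Nat.lt_of_lt_of_le hk hi') h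
      have hGmem : gi ∈ G := by
        rw [← hGk, List.getD_eq_getElem G 0 hkG]; exact List.getElem_mem hkG
      obtain ⟨j0, hj0⟩ := Option.isSome_iff_exists.mp
        ((PySem.List.index?_isSome_iff G gi).mpr hGmem)
      obtain ⟨hj0lt, hGj0, hmin⟩ := PySem.List.getElem_of_index?_eq_some hj0
      have hj0k : j0 ≤ k := by
        by_contra hc
        exact hmin k (Nat.lt_of_not_le hc) (by rw [← List.getD_eq_getElem G 0 hkG]; exact hGk)
      have hj0i : j0 < i := Nat.lt_of_le_of_lt hj0k hk
      have hGj0D : G.getD j0 0 = gi := by rw [List.getD_eq_getElem G 0 hj0lt]; exact hGj0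
      have hfirst_j0 : ∀ k' < j0, G.getD k' 0 ≠ G.getD j0 0 := by
        intro k' hk' hc
        exact hmin k' hk'
          (by rw [← List.getD_eq_getElem G 0 (Nat.lt_trans hk' hj0lt)]; rw [hc, hGj0D])
      -- evaluate the step
      rw [ppStepA]
      simp only [← hgi, if_pos hmem, hj0]
      have hseen : ppSeen G (i + 1) = ppSeen G i := by
        rw [ppSeen, PySem.Set.add_of_mem hmem]
      rw [hseen]
      refine Prod.ext_iff.mpr ⟨rfl, ?_⟩
      dsimp only
      rw [Option.getD_some, getD_map_range' _ i j0 hj0i,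
        set_map_range _ i j0 hj0i, List.map_append]
      congr 1
      · apply List.map_congr_left
        intro j hj
        simp only [List.mem_range] at hj
        by_cases hjj0 : j = j0
        · subst hjj0
          simp only [ppEntry, if_pos hfirst_j0]
          rw [hGj0D, ppTot_succ, if_pos rfl]
          simp
        · simp only [if_neg hjj0, ppEntry]
          by_cases hfo : ∀ k' < j, G.getD k' 0 ≠ G.getD j 0
          · rw [if_pos hfo, if_pos hfo, ppTot_succ]
            have hne : gi ≠ G.getD j 0 := by
              intro hc
              rcases Nat.lt_trichotomy j j0 with hlt | heq | hgt
              · exact hmin j (hlt)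
                  (by rw [← List.getD_eq_getElem G 0 (Nat.lt_of_lt_of_le hj (Nat.le_trans hi' h))]
                      exact hc.symm)
              · exact hjj0 heq
              · exact hfo j0 hgt (by rw [hGj0D, hc])
            rw [if_neg hne, add_zero]
          · rw [if_neg hfo, if_neg hfo]
      · simp only [List.map_cons, List.map_nil, ppEntry]
        have : ¬ ∀ k' < i, G.getD k' 0 ≠ G.getD i 0 := by
          push Not
          exact ⟨j0, hj0i, by rw [hGj0D]⟩
        rw [if_neg this]
    · -- first occurrence: append A[i]
      have hnone : ∀ k < i, G.getD k 0 ≠ gi := by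
        intro k hk hc
        exact hmem ((mem_ppSeen G gi i).mpr ⟨k, hk, hc⟩)
      rw [ppStepA]
      simp only [← hgi, if_neg hmem]
      have hseen : ppSeen G (i + 1) = ppSeen G i ++ [gi] := by
        rw [ppSeen, PySem.Set.add_of_not_mem hmem]
      rw [hseen]
      refine Prod.ext_iff.mpr ⟨rfl, ?_⟩
      dsimp only
      rw [List.map_append]
      congr 1
      · apply List.map_congr_left
        intro j hj
        simp only [List.mem_range] at hj
        simp only [ppEntry]
        by_cases hfo : ∀ k' < j, G.getD k' 0 ≠ G.getD j 0
        · rw [if_pos hfo, if_pos hfo, ppTot_succ]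
          have hne : gi ≠ G.getD j 0 := fun hc => hnone j hj hc.symm
          rw [if_neg hne, add_zero]
        · rw [if_neg hfo, if_neg hfo]
      · simp only [List.map_cons, List.map_nil, ppEntry]
        rw [if_pos hnone, ppTot_succ, if_pos rfl,
          ppTot_zero_of A G i gi hnone, zero_add]

-- the dict of B's first pass holds complete group totals
lemma ppSums_getD_gen (l : List (Int × Int)) :
    ∀ (d : PySem.Dict Int Int) (g : Int),
      (l.foldl (fun d p => d.insert p.2 (d.getD p.2 0 + p.1)) d).getD g 0 =
        d.getD g 0 + ((l.filter (fun p => p.2 == g)).map (fun p => p.1)).sum := by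
  induction l with
  | nil => intro d g; simp
  | cons p l ih =>
    intro d g
    rw [List.foldl_cons, ih]
    rw [PySem.Dict.getD_insert]
    by_cases hpg : p.2 = g
    · rw [if_pos (by rw [hpg]), List.filter_cons, if_pos (by simp [hpg])]
      rw [hpg]
      simp [add_assoc]
    · rw [if_neg (fun hc => hpg hc.symm), List.filter_cons,
        if_neg (by simp [hpg])]

lemma zip_eq_map_range (A G : List Int) (h : A.length ≤ G.length) :
    A.zip G = (List.range A.length).map (fun k => (A.getD k 0, G.getD k 0)) := by
  apply List.ext_getElem
  · simp [Nat.min_eq_left h]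
  · intro k h1 h2
    simp only [List.length_zip, Nat.min_eq_left h] at h1
    simp only [List.getElem_zip, List.getElem_map, List.getElem_range]
    rw [List.getD_eq_getElem A 0 h1, List.getD_eq_getElem G 0 (Nat.lt_of_lt_of_le h1 h)]

lemma ppSums_getD (A G : List Int) (h : A.length ≤ G.length) (g : Int) :
    (ppSums A G).getD g 0 = ppTot A G A.length g := by
  unfold ppSums
  rw [zip_eq_map_range A G h, ppSums_getD_gen, PySem.Dict.getD_empty, zero_add,
    List.filter_map, List.map_map]
  unfold ppTot
  congr 1

lemma take_eq_map_range (G : List Int) (n : Nat) (h : n ≤ G.length) :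
    G.take n = (List.range n).map (fun k => G.getD k 0) := by
  apply List.ext_getElem
  · simp [Nat.min_eq_left h]
  · intro k h1 h2
    simp only [List.length_take, Nat.min_eq_left h] at h1
    simp only [List.getElem_take, List.getElem_map, List.getElem_range]
    rw [List.getD_eq_getElem G 0 (Nat.lt_of_lt_of_le h1 h)]

-- the invariant of B's second pass
lemma loopB (G : List Int) (sums : PySem.Dict Int Int) :
    ∀ i, (List.range i).foldl (fun st k => ppStepB sums st (G.getD k 0))
          (PySem.Set.empty, []) =
        (ppSeen G i, (List.range i).map (fun j =>
          if ∀ k < j, G.getD k 0 ≠ G.getD j 0 then sums.getD (G.getD j 0) 0 else 0)) := by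
  intro i
  induction i with
  | zero => simp [ppSeen, PySem.Set.empty]
  | succ i ih =>
    rw [List.range_succ, List.foldl_append, ih]
    simp only [List.foldl_cons, List.foldl_nil]
    set gi := G.getD i 0 with hgi
    by_cases hmem : gi ∈ ppSeen G i
    · rw [ppStepB]
      rw [if_pos ((PySem.Set.contains_iff _ _).mpr hmem)]
      have hseen : ppSeen G (i + 1) = ppSeen G i := by
        rw [ppSeen, PySem.Set.add_of_mem hmem]
      rw [hseen]
      refine Prod.ext_iff.mpr ⟨rfl, ?_⟩
      dsimp only
      rw [List.map_append]
      congr 1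
      simp only [List.map_cons, List.map_nil]
      obtain ⟨k, hk, hGk⟩ := (mem_ppSeen G gi i).mp hmem
      have : ¬ ∀ k' < i, G.getD k' 0 ≠ G.getD i 0 := by
        push Not
        exact ⟨k, hk, by rw [← hgi, hGk]⟩
      rw [if_neg this]
    · rw [ppStepB]
      rw [if_neg (by
        intro hc
        exact hmem ((PySem.Set.contains_iff _ _).mp hc))]
      have hseen : ppSeen G (i + 1) = ppSeen G i ++ [gi] := by
        rw [ppSeen, PySem.Set.add_of_not_mem hmem]
      rw [hseen]
      refine Prod.ext_iff.mpr ⟨?_, ?_⟩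
      · dsimp only
        rw [PySem.Set.add_of_not_mem hmem]
      · dsimp only
        rw [List.map_append]
        congr 1
        simp only [List.map_cons, List.map_nil]
        have hnone : ∀ k < i, G.getD k 0 ≠ G.getD i 0 := by
          intro k hk hc
          exact hmem ((mem_ppSeen G gi i).mpr ⟨k, hk, by rw [hc, hgi]⟩)
        rw [if_pos hnone]

-- ===== VERDICT (by name: the statement is the Claim_ definition above) =====
theorem pp_conversion_spec : Claim_equal_pp_conversion := by
  intro A G _ hpre
  unfold Spec_pp_conversion
  unfold Pre_pp_conversion at hpre
  rw [pp_conversion, loopA A G hpre A.length (le_refl _)]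
  rw [pp_conversion_alt, take_eq_map_range G A.length hpre, List.foldl_map,
    loopB G (ppSums A G) A.length]
  simp only
  apply List.map_congr_left
  intro j hj
  rw [ppEntry, ppSums_getD A G hpre]
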